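-- pv_equiv track=rewrite | github.com/Duzf7/Tokenixo | Tokenixo.py | _build_line_index
-- ===== SOURCE A (Python) =====
-- def _build_line_index(text):
--     """Build list of char offsets where each line starts. C-level str.find."""
--     starts = [0]
--     pos = 0
--     while True:
--         pos = text.find('\n', pos)
--         if pos == -1:
--             break
--         pos += 1
--         starts.append(pos)
--     return starts
-- ===== SOURCE B (Python) =====
-- def _build_line_index(text):
--     """Build list of char offsets where each line starts, by folding over split pieces."""
--     starts = [0]
--     off = 0
--     for part in text.split('\n')[:-1]:
--         off += len(part) + 1
--         starts.append(off)
--     return starts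
-- ===== Notes on version B (the rewrite author's own statement) =====
-- stated objective: simpler
-- what changed: B splits the text on newlines once and folds a running offset over the pieces instead of repeatedly calling str.find in a while loop.
import Mathlib
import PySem

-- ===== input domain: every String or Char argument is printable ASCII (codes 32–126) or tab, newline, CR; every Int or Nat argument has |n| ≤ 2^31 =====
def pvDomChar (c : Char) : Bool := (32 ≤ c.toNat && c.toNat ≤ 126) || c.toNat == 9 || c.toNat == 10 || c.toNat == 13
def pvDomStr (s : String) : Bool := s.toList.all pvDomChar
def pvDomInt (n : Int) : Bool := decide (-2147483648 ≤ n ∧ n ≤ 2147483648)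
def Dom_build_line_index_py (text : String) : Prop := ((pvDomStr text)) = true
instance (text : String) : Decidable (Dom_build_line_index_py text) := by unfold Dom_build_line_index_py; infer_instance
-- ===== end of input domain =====

-- B replaces A's repeated str.find while-loop by one split('\n') and a fold of a
-- running offset over the pieces (objective: simpler; same O(n) cost).

-- ===== PORT A =====
-- A's `while True` loop: `pos = text.find('\n', pos)`; stop on -1, else pos += 1 and append.
-- The fuel argument only bounds the iteration count (each step moves pos forward); it is
-- sufficient at text.length + 1, so the port computes exactly A's loop.
def aGo (cs : List Char) (fuel : Nat) (pos : Nat) (starts : List Int) : List Int :=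
  match fuel with
  | 0 => starts
  | fuel + 1 =>
    let p := PySem.Chars.findFrom cs ['\n'] (pos : Int) none
    if p = -1 then starts
    else aGo cs fuel (p.toNat + 1) (starts ++ [p + 1])

def build_line_index_py (text : String) : List Int :=
  aGo text.toList (text.toList.length + 1) 0 [0]

-- ===== PORT B =====
-- B: starts = [0]; off = 0; for part in text.split('\n')[:-1]: off += len(part)+1; starts.append(off)
def build_line_index_py_alt (text : String) : List Int :=
  (((PySem.Chars.splitOn text.toList ['\n']).dropLast).foldl
    (fun (st : Int × List Int) part =>
      ((st.1 + part.length + 1 : Int), st.2 ++ [(st.1 + part.length + 1 : Int)]))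
    ((0 : Int), ([0] : List Int))).2

-- ===== PRECONDITION & SPEC =====
def Spec_build_line_index_py (text : String) (out : List Int) : Prop := out = build_line_index_py_alt text
instance (text : String) (out : List Int) : Decidable (Spec_build_line_index_py text out) := by unfold Spec_build_line_index_py; infer_instance

-- ===== CLAIM (what is proved, stated in full; the proofs are below) =====
def Claim_equal_build_line_index_py : Prop := ∀ (text : String), Dom_build_line_index_py text → Spec_build_line_index_py text (build_line_index_py text)

-- ===== LEMMAS AND PROOFS =====

/-- Reference form of the line-start list: scan the characters once, emitting
`off + 1` after each newline. Both ports are reduced to this. -/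
def specGo : List Char → Int → List Int
  | [], _ => []
  | c :: rest, off =>
    if c = '\n' then (off + 1) :: specGo rest (off + 1) else specGo rest (off + 1)

-- ---- A side: characterize PySem.Chars.find on the single-char pattern ['\n'] ----

lemma find_go_shift (s : List Char) (k : Nat) :
    PySem.Chars.find.go ['\n'] s k =
      if PySem.Chars.find.go ['\n'] s 0 = -1 then -1
      else (k : Int) + PySem.Chars.find.go ['\n'] s 0 := by
  induction s generalizing k with
  | nil => simp [PySem.Chars.find.go]
  | cons c t ih =>
    by_cases hp : (['\n'] : List Char).isPrefixOf (c :: t) = true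
    · simp [PySem.Chars.find.go, hp]
    · have hneg : -1 ≤ PySem.Chars.find.go ['\n'] t 0 := by
        have := PySem.Chars.neg_one_le_find t ['\n']
        simpa [PySem.Chars.find] using this
      simp only [PySem.Chars.find.go, hp, if_neg, Bool.not_eq_true] at *
      rw [ih (k + 1), ih 1]
      by_cases hz : PySem.Chars.find.go ['\n'] t 0 = -1
      · simp [hz]
      · have : ¬ ((1 : Int) + PySem.Chars.find.go ['\n'] t 0 = -1) := by omega
        simp [hz, this]
        omega

lemma find_cons (c : Char) (t : List Char) :
    PySem.Chars.find (c :: t) ['\n'] =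
      if c = '\n' then 0
      else if PySem.Chars.find t ['\n'] = -1 then -1 else 1 + PySem.Chars.find t ['\n'] := by
  have hpref : ((['\n'] : List Char).isPrefixOf (c :: t) = true) ↔ c = '\n' := by
    simp [List.isPrefixOf]; tauto
  by_cases hc : c = '\n'
  · simp [PySem.Chars.find, PySem.Chars.find.go, hc]
  · have : ¬ ((['\n'] : List Char).isPrefixOf (c :: t) = true) := fun h => hc (hpref.mp h)
    simp only [PySem.Chars.find, PySem.Chars.find.go]
    rw [if_neg this, find_go_shift t 1]
    simp [hc]

/-- `specGo` follows `find`: either no newline (empty result) or the first newline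
at index `g` yields `off + g + 1` and the scan continues after it. -/
lemma find_specGo (s : List Char) (off : Int) :
    specGo s off =
      if PySem.Chars.find s ['\n'] = -1 then []
      else (off + PySem.Chars.find s ['\n'] + 1) ::
        specGo (s.drop ((PySem.Chars.find s ['\n']).toNat + 1))
          (off + PySem.Chars.find s ['\n'] + 1) := by
  induction s generalizing off with
  | nil => simp [specGo, PySem.Chars.find, PySem.Chars.find.go]
  | cons c t ih =>
    rw [find_cons]
    by_cases hc : c = '\n'
    · simp [specGo, hc]
    · have hneg : -1 ≤ PySem.Chars.find t ['\n'] := PySem.Chars.neg_one_le_find t ['\n']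
      by_cases hz : PySem.Chars.find t ['\n'] = -1
      · simp only [specGo, if_neg hc, hc, ih (off + 1), hz]
        simp
      · have hge : 0 ≤ PySem.Chars.find t ['\n'] := by omega
        have h1 : ¬ ((1 : Int) + PySem.Chars.find t ['\n'] = -1) := by omega
        have htn : ((1 : Int) + PySem.Chars.find t ['\n']).toNat
            = (PySem.Chars.find t ['\n']).toNat + 1 := by omega
        simp only [specGo, if_neg hc, hc, ih (off + 1), hz, if_neg h1, if_false, htn,
          List.drop_succ_cons]
        have e : off + 1 + PySem.Chars.find t ['\n'] + 1
            = off + (1 + PySem.Chars.find t ['\n']) + 1 := by ring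
        rw [e]

lemma aGo_eq (cs : List Char) (fuel pos : Nat) (starts : List Int)
    (hle : pos ≤ cs.length) (hf : cs.length - pos < fuel) :
    aGo cs fuel pos starts = starts ++ specGo (cs.drop pos) (pos : Int) := by
  induction fuel generalizing pos starts with
  | zero => omega
  | succ fuel ih =>
    rw [aGo]
    rw [PySem.Chars.findFrom_natCast cs ['\n'] pos hle]
    set g := PySem.Chars.find (cs.drop pos) ['\n'] with hg
    by_cases hz : g = -1
    · simp only [hz, reduceIte]
      rw [find_specGo, ← hg, if_pos hz, List.append_nil]
    · have hneg : -1 ≤ g := PySem.Chars.neg_one_le_find _ _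
      have hge : 0 ≤ g := by omega
      have hfound : (['\n'] : List Char) <+: List.drop g.toNat (cs.drop pos) :=
        (PySem.Chars.find_spec (sub := ['\n']) (s := cs.drop pos) (by omega)).1
      have hlen : g.toNat < (cs.drop pos).length := by
        have h := hfound.length_le
        simp [List.length_drop] at h ⊢
        omega
      have hlt : pos + g.toNat < cs.length := by
        simp [List.length_drop] at hlen; omega
      have hlen' : pos + g.toNat + 1 ≤ cs.length := by omega
      have hne : ¬ ((pos : Int) + g = -1) := by omega
      simp only [if_neg hz, if_neg hne]
      have htn : ((pos : Int) + g).toNat = pos + g.toNat := by omega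
      rw [htn, ih (pos + g.toNat + 1) _ hlen' (by omega)]
      rw [find_specGo (cs.drop pos) (pos : Int), ← hg, if_neg hz]
      rw [List.drop_drop]
      have e1 : pos + (g.toNat + 1) = pos + g.toNat + 1 := by omega
      have e2 : ((pos + g.toNat + 1 : Nat) : Int) = (pos : Int) + g + 1 := by
        push_cast; omega
      rw [e1, e2]
      simp

-- ---- B side: characterize splitOn on the single-char separator ['\n'] ----

/-- The pieces produced by `s.split('\n')` when `cur` (reversed) is the pending piece. -/
def splitParts : List Char → List Char → List (List Char)
  | [], cur => [cur.reverse]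
  | c :: rest, cur =>
    if c = '\n' then cur.reverse :: splitParts rest [] else splitParts rest (c :: cur)

lemma splitParts_ne_nil (s cur : List Char) : splitParts s cur ≠ [] := by
  cases s with
  | nil => simp [splitParts]
  | cons c rest =>
    by_cases hc : c = '\n' <;> simp [splitParts, hc]
    exact splitParts_ne_nil rest (c :: cur)

lemma splitOn_go_eq (fuel : Nat) (s cur : List Char) (acc : List (List Char))
    (h : s.length ≤ fuel) :
    PySem.Chars.splitOn.go ['\n'] fuel s cur acc = acc.reverse ++ splitParts s cur := by
  induction fuel generalizing s cur acc with
  | zero =>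
    have : s = [] := by simpa using List.length_eq_zero_iff.mp (Nat.le_zero.mp h)
    subst this
    simp [PySem.Chars.splitOn.go, splitParts]
  | succ fuel ih =>
    cases s with
    | nil => simp [PySem.Chars.splitOn.go, splitParts]
    | cons c rest =>
      have hpref : ((['\n'] : List Char).isPrefixOf (c :: rest) = true) ↔ c = '\n' := by
        simp [List.isPrefixOf]; tauto
      by_cases hc : c = '\n'
      · rw [PySem.Chars.splitOn.go]
        simp only [hpref.mpr hc, if_pos]
        rw [ih _ _ _ (by simpa using Nat.le_of_succ_le_succ h)]
        simp [splitParts, hc]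
      · have hnp : ¬ ((['\n'] : List Char).isPrefixOf (c :: rest) = true) :=
          fun hx => hc (hpref.mp hx)
        rw [PySem.Chars.splitOn.go]
        simp only [hnp, if_neg, Bool.not_eq_true]
        rw [ih _ _ _ (by simpa using Nat.le_of_succ_le_succ h)]
        simp [splitParts, hc]

lemma splitOn_eq_splitParts (s : List Char) :
    PySem.Chars.splitOn s ['\n'] = splitParts s [] := by
  rw [PySem.Chars.splitOn, splitOn_go_eq _ _ _ _ (by omega)]
  simp

lemma fold_splitParts (s cur : List Char) (base : Int) (acc : List Int) :
    (((splitParts s cur).dropLast).foldl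
      (fun (st : Int × List Int) part =>
        ((st.1 + part.length + 1 : Int), st.2 ++ [(st.1 + part.length + 1 : Int)]))
      (base, acc)).2 = acc ++ specGo s (base + cur.length) := by
  induction s generalizing cur base acc with
  | nil => simp [splitParts, specGo]
  | cons c rest ih =>
    by_cases hc : c = '\n'
    · rw [splitParts, if_pos hc,
        List.dropLast_cons_of_ne_nil (splitParts_ne_nil rest [])]
      rw [List.foldl_cons]
      simp only [List.length_reverse]
      rw [ih [] (base + cur.length + 1) (acc ++ [base + cur.length + 1])]
      simp [specGo, hc, add_assoc]
    · rw [splitParts, if_neg hc, ih (c :: cur) base acc]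
      simp only [specGo, if_neg hc, hc, List.length_cons]
      push_cast
      ring_nf

-- ===== VERDICT (by name: the statement is the Claim_ definition above) =====
theorem build_line_index_py_spec : Claim_equal_build_line_index_py := by
  intro text _
  unfold Spec_build_line_index_py build_line_index_py build_line_index_py_alt
  rw [aGo_eq text.toList (text.toList.length + 1) 0 [0] (by omega) (by omega)]
  rw [splitOn_eq_splitParts, fold_splitParts text.toList [] 0 [0]]
  simp
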